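-- pv_equiv track=rewrite | github.com/moth1995/kdb_to_gdb | kdb_to_gdb.py | get_kit_set
-- ===== SOURCE A (Python) =====
-- KIT_SETS_NAMES = [
--     "ga",
--     "gb",
--     "pa",
--     "pb",
-- ]
--
-- TEXTURES_IN_SET = 5
--
-- def get_kit_set(file_number:int, folder_number:int):
--     texture_number = file_number - folder_number
--     first_texture = 0
--     for i, kit_set_name in enumerate(KIT_SETS_NAMES, 1):
--         last_texture = TEXTURES_IN_SET * i
--         if first_texture <= texture_number < last_texture:
--             return kit_set_name
--         first_texture = last_texture
--     raise Exception("Couldn't determinate the kit set for file number %d from folder number %d" % (file_number, folder_number))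
-- ===== SOURCE B (Python) =====
-- KIT_SETS_NAMES = [
--     "ga",
--     "gb",
--     "pa",
--     "pb",
-- ]
--
-- TEXTURES_IN_SET = 5
--
-- def get_kit_set(file_number: int, folder_number: int):
--     texture_number = file_number - folder_number
--     if 0 <= texture_number < TEXTURES_IN_SET * len(KIT_SETS_NAMES):
--         return KIT_SETS_NAMES[texture_number // TEXTURES_IN_SET]
--     raise Exception("Couldn't determinate the kit set for file number %d from folder number %d" % (file_number, folder_number))
-- ===== Notes on version B (the rewrite author's own statement) =====
-- stated objective: simpler
-- what changed: Replaced the linear enumerate loop over range buckets with a closed-form bounds check and direct indexing by texture_number // TEXTURES_IN_SET.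
import Mathlib
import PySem

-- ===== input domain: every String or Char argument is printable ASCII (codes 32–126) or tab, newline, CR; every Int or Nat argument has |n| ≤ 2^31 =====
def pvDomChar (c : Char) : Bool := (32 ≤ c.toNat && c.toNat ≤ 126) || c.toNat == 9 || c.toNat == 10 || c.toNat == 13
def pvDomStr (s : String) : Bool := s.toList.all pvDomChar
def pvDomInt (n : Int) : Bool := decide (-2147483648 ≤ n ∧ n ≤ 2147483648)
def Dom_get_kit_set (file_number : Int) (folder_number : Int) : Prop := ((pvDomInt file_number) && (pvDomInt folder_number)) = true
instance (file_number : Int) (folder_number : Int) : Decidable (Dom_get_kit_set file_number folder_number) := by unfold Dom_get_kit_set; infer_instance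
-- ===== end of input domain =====

-- B replaces A's linear bucket scan with a O(1) bounds check + direct index (objective: simpler).
-- Both raise the same Exception outside Pre_; equivalence is about the returned value on Pre_.

-- ===== PORT A =====
def KIT_SETS_NAMES : List String := ["ga", "gb", "pa", "pb"]
def TEXTURES_IN_SET : Int := 5

-- the loop: state is first_texture; returns some name on hit, none when the loop ends (Python raises)
def get_kit_set_loop (texture_number : Int) : List (Int × String) → Int → Option String
  | [], _ => none
  | (i, name) :: rest, first_texture =>
      let last_texture := TEXTURES_IN_SET * i
      if first_texture ≤ texture_number ∧ texture_number < last_texture then some name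
      else get_kit_set_loop texture_number rest last_texture

def get_kit_set (file_number : Int) (folder_number : Int) : String :=
  let texture_number := file_number - folder_number
  match get_kit_set_loop texture_number ((KIT_SETS_NAMES.zipIdx 1).map (fun p => ((p.2 : Int), p.1))) 0 with
  | some name => name
  | none => ""   -- Python raises here; outside Pre_

-- ===== PORT B =====
def get_kit_set_alt (file_number : Int) (folder_number : Int) : String :=
  let texture_number := file_number - folder_number
  if 0 ≤ texture_number ∧ texture_number < TEXTURES_IN_SET * (KIT_SETS_NAMES.length : Int) then
    (PySem.List.pyGet? KIT_SETS_NAMES (PySem.Int.floordiv texture_number TEXTURES_IN_SET)).getD ""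
  else "" -- Python raises here; outside Pre_

-- ===== PRECONDITION & SPEC =====
-- Pre_: exactly the inputs on which A returns (otherwise A raises an Exception)
def Pre_get_kit_set (file_number : Int) (folder_number : Int) : Prop :=
  0 ≤ file_number - folder_number ∧ file_number - folder_number < 20
instance (file_number : Int) (folder_number : Int) : Decidable (Pre_get_kit_set file_number folder_number) := by unfold Pre_get_kit_set; infer_instance
def pvWitness_get_kit_set : Int × Int := (12, 3)

def Spec_get_kit_set (file_number : Int) (folder_number : Int) (out : String) : Prop := out = get_kit_set_alt file_number folder_number
instance (file_number : Int) (folder_number : Int) (out : String) : Decidable (Spec_get_kit_set file_number folder_number out) := by unfold Spec_get_kit_set; infer_instance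

-- ===== CLAIM =====
def Claim_equal_get_kit_set : Prop := ∀ (file_number : Int) (folder_number : Int), Dom_get_kit_set file_number folder_number → Pre_get_kit_set file_number folder_number → Spec_get_kit_set file_number folder_number (get_kit_set file_number folder_number)

-- ===== LEMMAS AND PROOFS =====
theorem both_eq (t : Int) (h0 : 0 ≤ t) (h20 : t < 20) (f g : Int) (hfg : f - g = t) :
    get_kit_set f g = get_kit_set_alt f g := by
  interval_cases t <;>
    simp [get_kit_set, get_kit_set_alt, get_kit_set_loop, KIT_SETS_NAMES, TEXTURES_IN_SET,
      hfg, List.zipIdx, PySem.Int.floordiv, PySem.List.pyGet?, PySem.List.pyIdx?]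

-- ===== VERDICT =====
theorem get_kit_set_spec : Claim_equal_get_kit_set := by
  intro f g _ hpre
  exact both_eq (f - g) hpre.1 hpre.2 f g rfl
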